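-- pv_equiv track=rewrite | github.com/zekkelar/FUZZEK-LIBRARY | FUZZY/implication.py | match_implies_with_rules
-- ===== SOURCE A (Python) =====
-- def match_implies_with_rules(implies, rules):
-- 	matched_results = {}
--
-- 	for result_key, conditions_list in implies.items():
-- 		matched_rules = []
--
-- 		for conditions in conditions_list:
-- 			conditions_split = [cond.split('|') for cond in conditions]
-- 			matched_rule = None
--
-- 			if all(len(cond_split) == 2 for cond_split in conditions_split):
-- 				conditions_dict = dict(conditions_split)
-- 				for rule_key, rule_data in rules.items():
-- 					if all(field in rule_data and rule_data[field] == value for field, value in conditions_dict.items()):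
-- 						matched_rule = rule_key
-- 						break
--
-- 			if matched_rule:
-- 				matched_rules.append(matched_rule)
--
-- 		matched_results[result_key] = matched_rules
-- 	return matched_results
-- ===== SOURCE B (Python) =====
-- def match_implies_with_rules(implies, rules):
--     names = list(rules)
--     # inverted index: (field, value) -> set of positions of the rules carrying that pair
--     index = {}
--     for i, data in enumerate(rules.values()):
--         for fv in data.items():
--             index.setdefault(fv, set()).add(i)
--
--     def first_match(conditions):
--         splits = [cond.split('|') for cond in conditions]
--         if not all(len(s) == 2 for s in splits):
--             return None
--         cand = set(range(len(names)))
--         for fv in dict(splits).items():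
--             cand &= index.get(fv, set())
--         return names[min(cand)] if cand else None
--
--     return {key: [name for name in map(first_match, groups) if name]
--             for key, groups in implies.items()}
-- ===== Notes on version B (the rewrite author's own statement) =====
-- stated objective: alternative
-- what changed: B replaces A's per-condition-group linear scan over all rules (re-checking every rule's fields each time) by an inverted index (field,value)->set of rule positions built once; each group intersects posting sets starting from the set of all positions and takes the minimum (= first rule in order).
import Mathlib
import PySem

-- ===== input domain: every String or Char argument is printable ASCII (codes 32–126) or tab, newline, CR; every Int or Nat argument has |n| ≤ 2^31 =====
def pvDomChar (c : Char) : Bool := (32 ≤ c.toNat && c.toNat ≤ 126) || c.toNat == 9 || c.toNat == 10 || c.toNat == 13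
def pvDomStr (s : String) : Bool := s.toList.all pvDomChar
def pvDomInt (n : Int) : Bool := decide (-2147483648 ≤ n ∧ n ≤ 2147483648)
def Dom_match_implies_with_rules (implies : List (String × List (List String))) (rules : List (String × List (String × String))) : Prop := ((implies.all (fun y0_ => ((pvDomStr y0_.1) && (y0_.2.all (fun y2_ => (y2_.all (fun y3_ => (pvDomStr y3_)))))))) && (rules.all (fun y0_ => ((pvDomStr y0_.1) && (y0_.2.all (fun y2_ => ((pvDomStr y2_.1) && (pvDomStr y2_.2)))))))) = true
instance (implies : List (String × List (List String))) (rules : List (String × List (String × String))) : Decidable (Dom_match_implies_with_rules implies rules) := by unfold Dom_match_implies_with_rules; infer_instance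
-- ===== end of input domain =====

-- B replaces A's per-condition-group linear scan over all rules by an inverted index
-- (field,value) -> set of rule positions, intersected per group starting from all positions,
-- taking the minimum position (objective: alternative algorithm; not measured faster here).
-- Dict-typed parameters arrive as association lists; both ports first apply
-- PySem.Dict.ofList to them (Python receives actual dicts: duplicate keys collapse).

-- cond.split('|') — the identical expression appears in both Pythons (sep "|" ≠ "", so split? is always some)
def pvSplit (cond : String) : List String := (PySem.Str.split? cond "|").getD []

-- ===== PORT A =====

-- all(field in rule_data and rule_data[field] == value for field, value in conditions_dict.items())
def pvCheckA (cd rd : PySem.Dict String String) : Bool :=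
  cd.items.all (fun fv => match rd.get? fv.1 with | some w => w == fv.2 | none => false)

-- for rule_key, rule_data in rules.items(): ... break   (first match, else None)
def pvScanA (cd : PySem.Dict String String) : List (String × PySem.Dict String String) → Option String
  | [] => none
  | r :: rest => if pvCheckA cd r.2 then some r.1 else pvScanA cd rest

def match_implies_with_rules (implies : List (String × List (List String))) (rules : List (String × List (String × String))) : List (String × List String) :=
  let rulesD : PySem.Dict String (PySem.Dict String String) :=
    PySem.Dict.ofList (rules.map (fun r => (r.1, PySem.Dict.ofList r.2)))
  ((PySem.Dict.ofList implies).items.foldl (fun md p =>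
      md.insert p.1 (p.2.foldl (fun mr conditions =>
        let cs := conditions.map pvSplit
        let matched_rule : Option String :=
          if cs.all (fun s => s.length == 2) then
            pvScanA (PySem.Dict.ofList (cs.map (fun s => (s.getD 0 "", s.getD 1 "")))) rulesD.items
          else none
        match matched_rule with
        | some rk => if rk ≠ "" then mr ++ [rk] else mr   -- if matched_rule: (falsy for "")
        | none => mr) [])) PySem.Dict.empty).items

-- ===== PORT B =====
-- index.setdefault(fv, set()).add(i) over enumerate(rules.values()) / data.items()
def pvIndexB (vals : List (PySem.Dict String String)) : PySem.Dict (String × String) (PySem.Set Int) :=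
  (PySem.List.enumerate vals 0).foldl (fun d p =>
     p.2.items.foldl (fun d fv => d.modify fv PySem.Set.empty (fun s => PySem.Set.add s p.1)) d)
    PySem.Dict.empty

-- def first_match(conditions): cand = set(range(len(names))); for fv: cand &= index.get(fv, set());
-- return names[min(cand)] if cand else None
-- (names[min(cand)] ported with pyGet?; min(cand) is always a valid index when cand is nonempty)
def pvSelectB (index : PySem.Dict (String × String) (PySem.Set Int)) (names : List String) (conditions : List String) : Option String :=
  let splits := conditions.map pvSplit
  if splits.all (fun s => s.length == 2) then
    let cand := (PySem.Dict.ofList (splits.map (fun s => (s.getD 0 "", s.getD 1 "")))).items.foldl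
        (fun c fv => PySem.Set.inter c (index.getD fv PySem.Set.empty))
        (PySem.Set.ofList (PySem.List.pyRange 0 (names.length : Int) 1))
    if cand.isEmpty then none
    else match PySem.List.min? cand (fun x => x) with
      | some m => PySem.List.pyGet? names m
      | none => none
  else none

def match_implies_with_rules_alt (implies : List (String × List (List String))) (rules : List (String × List (String × String))) : List (String × List String) :=
  let rulesD : PySem.Dict String (PySem.Dict String String) :=
    PySem.Dict.ofList (rules.map (fun r => (r.1, PySem.Dict.ofList r.2)))
  let names := rulesD.keys
  let index := pvIndexB rulesD.values
  -- {key: [name for name in map(first_match, groups) if name] for key, groups in implies.items()}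
  (PySem.Dict.ofList implies).items.map (fun p =>
    (p.1, p.2.filterMap (fun conditions =>
      match pvSelectB index names conditions with
      | some name => if name ≠ "" then some name else none   -- if name: (drops None and "")
      | none => none)))

-- ===== PRECONDITION & SPEC =====
def Spec_match_implies_with_rules (implies : List (String × List (List String))) (rules : List (String × List (String × String))) (out : List (String × List String)) : Prop := out = match_implies_with_rules_alt implies rules
instance (implies : List (String × List (List String))) (rules : List (String × List (String × String))) (out : List (String × List String)) : Decidable (Spec_match_implies_with_rules implies rules out) := by unfold Spec_match_implies_with_rules; infer_instance

-- ===== CLAIM (what is proved, stated in full; the proofs are below) =====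
def Claim_equal_match_implies_with_rules : Prop := ∀ (implies : List (String × List (List String))) (rules : List (String × List (String × String))), Dom_match_implies_with_rules implies rules → Spec_match_implies_with_rules implies rules (match_implies_with_rules implies rules)

-- ===== LEMMAS AND PROOFS =====

-- every value stored in Dict.ofList came from the input pair list
theorem pv_mem_items_foldl_insert {κ ν : Type} [BEq κ] [LawfulBEq κ]
    (l : List (κ × ν)) (d : PySem.Dict κ ν) (p : κ × ν)
    (h : p ∈ (l.foldl (fun d q => d.insert q.1 q.2) d).items) : p ∈ d.items ∨ p ∈ l := by
  induction l generalizing d with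
  | nil => exact Or.inl h
  | cons q l ih =>
      rcases ih (d.insert q.1 q.2) h with h' | h'
      · rcases (PySem.Dict.mem_items_insert d q.1 q.2 p).1 h' with h'' | h''
        · exact Or.inr (by simp [h''])
        · exact Or.inl h''.1
      · exact Or.inr (List.mem_cons_of_mem _ h')

theorem pv_mem_items_ofList {κ ν : Type} [BEq κ] [LawfulBEq κ]
    (l : List (κ × ν)) (p : κ × ν) (h : p ∈ (PySem.Dict.ofList l).items) : p ∈ l := by
  have := pv_mem_items_foldl_insert l PySem.Dict.empty p (by exact h)
  simpa [PySem.Dict.empty] using this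

-- inner index-building loop: what ends up in posting set getD fv0
theorem pv_inner_index (ps : List (String × String)) (i : Int) (fv0 : String × String) (x : Int) :
    ∀ d : PySem.Dict (String × String) (PySem.Set Int),
    (x ∈ (ps.foldl (fun d fv => d.modify fv PySem.Set.empty (fun s => PySem.Set.add s i)) d).getD fv0 PySem.Set.empty
      ↔ x ∈ d.getD fv0 PySem.Set.empty ∨ (x = i ∧ fv0 ∈ ps)) := by
  induction ps with
  | nil => intro d; simp
  | cons fv ps ih =>
      intro d
      rw [List.foldl_cons, ih]
      rw [PySem.Dict.getD_modify]
      by_cases hfv : fv0 = fv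
      · subst hfv
        simp [PySem.Set.mem_add, List.mem_cons]
        tauto
      · simp only [if_neg hfv, List.mem_cons]
        tauto

-- outer index-building loop
theorem pv_outer_index (L : List (Int × PySem.Dict String String)) (fv : String × String) (x : Int) :
    ∀ d : PySem.Dict (String × String) (PySem.Set Int),
    (x ∈ (L.foldl (fun d p => p.2.items.foldl (fun d fv => d.modify fv PySem.Set.empty (fun s => PySem.Set.add s p.1)) d) d).getD fv PySem.Set.empty
      ↔ x ∈ d.getD fv PySem.Set.empty ∨ ∃ p ∈ L, x = p.1 ∧ fv ∈ p.2.items) := by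
  induction L with
  | nil => intro d; simp
  | cons p L ih =>
      intro d
      rw [List.foldl_cons, ih, pv_inner_index]
      constructor
      · rintro ((h | h) | h)
        · exact Or.inl h
        · exact Or.inr ⟨p, by simp, h⟩
        · rcases h with ⟨q, hq, h⟩; exact Or.inr ⟨q, by simp [hq], h⟩
      · rintro (h | ⟨q, hq, h⟩)
        · exact Or.inl (Or.inl h)
        · rcases List.mem_cons.1 hq with rfl | hq'
          · exact Or.inl (Or.inr h)
          · exact Or.inr ⟨q, hq', h⟩

theorem pv_mem_index (vals : List (PySem.Dict String String)) (fv : String × String) (x : Int) :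
    x ∈ (pvIndexB vals).getD fv PySem.Set.empty
      ↔ ∃ (k : Nat) (h : k < vals.length), x = (k : Int) ∧ fv ∈ vals[k].items := by
  unfold pvIndexB
  rw [pv_outer_index]
  simp only [PySem.Dict.getD_empty]
  constructor
  · rintro (h | ⟨p, hp, rfl, h⟩)
    · simp [PySem.Set.empty] at h
    · rcases (PySem.List.mem_enumerate_iff vals 0 p).1 hp with ⟨k, hk, rfl⟩
      exact ⟨k, hk, by simp, by simpa using h⟩
  · rintro ⟨k, hk, rfl, h⟩
    refine Or.inr ⟨((k : Int), vals[k]), ?_, by simp, h⟩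
    exact (PySem.List.mem_enumerate_iff vals 0 _).2 ⟨k, hk, by simp⟩

-- the intersection fold: membership characterisation
theorem pv_mem_inter (index : PySem.Dict (String × String) (PySem.Set Int))
    (l : List (String × String)) (x : Int) :
    ∀ cand : PySem.Set Int,
    (x ∈ l.foldl (fun c fv => PySem.Set.inter c (index.getD fv PySem.Set.empty)) cand
      ↔ x ∈ cand ∧ ∀ fv ∈ l, x ∈ index.getD fv PySem.Set.empty) := by
  induction l with
  | nil => intro cand; simp
  | cons fv l ih =>
      intro cand
      rw [List.foldl_cons, ih, PySem.Set.mem_inter]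
      constructor
      · rintro ⟨⟨h1, h2⟩, h3⟩
        exact ⟨h1, fun g hg => by rcases List.mem_cons.1 hg with rfl | hg'; exacts [h2, h3 g hg']⟩
      · rintro ⟨h1, h2⟩
        exact ⟨⟨h1, h2 fv (by simp)⟩, fun g hg => h2 g (by simp [hg])⟩

-- A's membership test = pair membership in the rule's items (keys unique)
theorem pv_check_iff (cd rd : PySem.Dict String String) (hnd : rd.keys.Nodup) :
    pvCheckA cd rd = true ↔ ∀ fv ∈ cd.items, fv ∈ rd.items := by
  unfold pvCheckA
  rw [List.all_eq_true]
  refine forall_congr' (fun fv => forall_congr' (fun hfv => ?_))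
  have : (match rd.get? fv.1 with | some w => w == fv.2 | none => false) = true ↔ rd.get? fv.1 = some fv.2 := by
    cases h : rd.get? fv.1 <;> simp
  rw [this, PySem.Dict.get?_eq_some_iff_mem_items rd fv.1 fv.2 hnd]

-- A's scan = first index satisfying the check
theorem pv_scanA_eq (cd : PySem.Dict String String) (rl : List (String × PySem.Dict String String)) :
    pvScanA cd rl = (rl.findIdx? (fun r => pvCheckA cd r.2)).map (fun j => (rl.getD j ("", PySem.Dict.empty)).1) := by
  induction rl with
  | nil => simp [pvScanA]
  | cons r rest ih =>
      rw [pvScanA, List.findIdx?_cons]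
      by_cases h : pvCheckA cd r.2
      · simp [h]
      · simp only [h, Bool.false_eq_true, ite_false, ih, Option.map_map]
        cases rest.findIdx? (fun r => pvCheckA cd r.2) <;> simp

-- A's loop body appends exactly the filterMap of the per-condition option
theorem pv_foldl_opt (g : List String → Option String) (l : List (List String)) :
    ∀ acc : List String,
    l.foldl (fun mr conditions =>
        match g conditions with
        | some rk => if rk ≠ "" then mr ++ [rk] else mr
        | none => mr) acc
      = acc ++ l.filterMap (fun c => (g c).bind (fun rk => if rk ≠ "" then some rk else none)) := by
  induction l with
  | nil => intro acc; simp
  | cons c l ih =>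
      intro acc
      rw [List.foldl_cons, List.filterMap_cons, ih]
      cases h : g c with
      | none => simp
      | some rk =>
          by_cases hrk : rk = ""
          · simp [hrk]
          · simp [hrk]

-- the heart: B's index/intersect/min selection names exactly A's first scan hit
theorem pv_select_eq (rl : List (String × PySem.Dict String String))
    (hv : ∀ r ∈ rl, r.2.keys.Nodup)
    (conditions : List String) :
    pvSelectB (pvIndexB (rl.map Prod.snd)) (rl.map Prod.fst) conditions
      = (if ((conditions.map pvSplit).all (fun s => s.length == 2)) then
           pvScanA (PySem.Dict.ofList ((conditions.map pvSplit).map (fun s => (s.getD 0 "", s.getD 1 "")))) rl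
         else none) := by
  simp only [pvSelectB]
  by_cases hall : (conditions.map pvSplit).all (fun s => s.length == 2)
  case neg => rw [if_neg hall, if_neg hall]
  rw [if_pos hall, if_pos hall]
  set cd := PySem.Dict.ofList ((conditions.map pvSplit).map (fun s => (s.getD 0 "", s.getD 1 ""))) with hcd
  rw [pv_scanA_eq]
  set cand := cd.items.foldl (fun c fv => PySem.Set.inter c ((pvIndexB (rl.map Prod.snd)).getD fv PySem.Set.empty))
      (PySem.Set.ofList (PySem.List.pyRange 0 (((rl.map Prod.fst).length : Nat) : Int) 1)) with hcand
  have hlen : (rl.map Prod.snd).length = rl.length := List.length_map ..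
  -- membership in the candidate set
  have hmem : ∀ x : Int, x ∈ cand ↔ ∃ (k : Nat) (h : k < rl.length), x = (k : Int) ∧ pvCheckA cd (rl[k].2) = true := by
    intro x
    rw [hcand, pv_mem_inter]
    rw [PySem.Set.mem_ofList, PySem.List.mem_pyRange_one]
    constructor
    · rintro ⟨⟨h0, h1⟩, h⟩
      lift x to Nat using h0 with k
      have hk : k < rl.length := by simpa using h1
      refine ⟨k, hk, rfl, ?_⟩
      rw [pv_check_iff]
      · intro fv hfv
        have := h fv hfv
        rw [pv_mem_index] at this
        obtain ⟨k', hk', hkk, hmemfv⟩ := this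
        have : k = k' := by exact_mod_cast hkk
        subst this
        simpa using hmemfv
      · exact hv _ (List.getElem_mem hk)
    · rintro ⟨k, hk, rfl, hchk⟩
      refine ⟨⟨by positivity, by simpa using hk⟩, ?_⟩
      intro fv hfv
      rw [pv_mem_index]
      refine ⟨k, by rw [hlen]; exact hk, rfl, ?_⟩
      have := (pv_check_iff cd (rl[k].2) (hv _ (List.getElem_mem hk))).1 hchk fv hfv
      simpa using this
  cases hfi : rl.findIdx? (fun r => pvCheckA cd r.2) with
  | none =>
      have hnone := List.findIdx?_eq_none_iff.1 hfi
      have hc : cand = [] := by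
        apply List.eq_nil_iff_forall_not_mem.2
        intro x hx
        obtain ⟨k, hk, rfl, hchk⟩ := (hmem x).1 hx
        have := hnone _ (List.getElem_mem hk)
        simp [hchk] at this
      rw [hc]
      rfl
  | some j =>
      obtain ⟨hj, pj, hminj⟩ := List.findIdx?_eq_some_iff_getElem.1 hfi
      have hjc : (j : Int) ∈ cand := (hmem _).2 ⟨j, hj, rfl, pj⟩
      have hne : cand.isEmpty = false := by
        cases h : cand.isEmpty
        · rfl
        · rw [List.isEmpty_iff.1 h] at hjc; simp at hjc
      rw [hne]
      simp only [Bool.false_eq_true, ite_false]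
      cases hmin : PySem.List.min? cand (fun x => x) with
      | none =>
          rw [PySem.List.min?_eq_none_iff] at hmin
          rw [hmin] at hjc
          simp at hjc
      | some m =>
          obtain ⟨k, hk, rfl, hchk⟩ := (hmem m).1 (PySem.List.min?_mem hmin)
          have hjk : j ≤ k := by
            by_contra hlt
            exact absurd hchk (by simpa using hminj k (by omega))
          have hkj : (k : Int) ≤ (j : Int) := PySem.List.min?_isMin hmin _ hjc
          have hkeq : j = k := by omega
          subst hkeq
          have hjn : j < (rl.map Prod.fst).length := by simpa using hj
          simp only [PySem.List.pyGet?_natCast, Option.map_some]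
          rw [List.getElem?_eq_getElem hjn, List.getD_eq_getElem _ _ hj]
          simp

-- A's outer loop: inserting under the (distinct) keys of implies, starting from {}, is a map
theorem pv_fold_items (l : List (String × List (List String))) (f : String × List (List String) → List String)
    (hnd : (l.map Prod.fst).Nodup) :
    (l.foldl (fun md p => md.insert p.1 (f p)) PySem.Dict.empty).items = l.map (fun p => (p.1, f p)) := by
  have := PySem.Dict.items_foldl_insert_fresh l Prod.fst f PySem.Dict.empty
    (fun a _ => PySem.Dict.contains_empty a.1) hnd
  simpa using this

-- ===== VERDICT (by name: the statement is the Claim_ definition above) =====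
theorem match_implies_with_rules_spec : Claim_equal_match_implies_with_rules := by
  intro implies rules _
  unfold Spec_match_implies_with_rules match_implies_with_rules match_implies_with_rules_alt
  dsimp only
  have hndimp : ((PySem.Dict.ofList implies).items.map Prod.fst).Nodup := by
    have := PySem.Dict.nodup_keys_ofList implies
    simpa [PySem.Dict.keys] using this
  have hv' : ∀ r ∈ (PySem.Dict.ofList (rules.map (fun r => (r.1, PySem.Dict.ofList r.2)))).items, r.2.keys.Nodup := by
    intro r hr
    have hr' := pv_mem_items_ofList _ _ hr
    rcases List.mem_map.1 hr' with ⟨q, -, rfl⟩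
    exact PySem.Dict.nodup_keys_ofList q.2
  rw [pv_fold_items _ _ hndimp]
  rw [show (PySem.Dict.ofList (rules.map (fun r => (r.1, PySem.Dict.ofList r.2)))).values
        = (PySem.Dict.ofList (rules.map (fun r => (r.1, PySem.Dict.ofList r.2)))).items.map Prod.snd from rfl,
      show (PySem.Dict.ofList (rules.map (fun r => (r.1, PySem.Dict.ofList r.2)))).keys
        = (PySem.Dict.ofList (rules.map (fun r => (r.1, PySem.Dict.ofList r.2)))).items.map Prod.fst from rfl]
  refine List.map_congr_left (fun p _ => ?_)
  refine Prod.ext rfl ?_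
  rw [pv_foldl_opt]
  rw [List.nil_append]
  refine List.filterMap_congr (fun c _ => ?_)
  rw [pv_select_eq _ hv' c]
  by_cases h : ((c.map pvSplit).all (fun s => s.length == 2))
  · rw [if_pos h]
    cases pvScanA (PySem.Dict.ofList ((c.map pvSplit).map (fun s => (s.getD 0 "", s.getD 1 "")))) (PySem.Dict.ofList (rules.map (fun r => (r.1, PySem.Dict.ofList r.2)))).items <;> simp
  · rw [if_neg h]
    simp
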